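-- pv_equiv track=rewrite | github.com/jblack97/dissertation_ERC | data.py | get_target_mask
-- ===== SOURCE A (Python) =====
-- def get_target_mask(tokens_a, tokens_c):
--     '''Finds index of the [CLS] token at the start
--     of the target utterance and creates mask'''
--     target_mask = []
--     for index, token in enumerate(tokens_a):
--
--         if token == '[CLS]':
--             if tokens_a[index+1: index + 1 + len(tokens_c)] == tokens_c:
--                 target_mask.append(1)
--             else:
--                 target_mask.append(0)
--         else:
--             target_mask.append(0)
--     return target_mask
-- ===== SOURCE B (Python) =====
-- def get_target_mask(tokens_a, tokens_c):
--     n = len(tokens_a)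
--     # Inverted, offset-major search: start from the candidate occurrence starts
--     # (the positions right after a '[CLS]') and refine that set with one global
--     # filter per pattern offset; the survivors are exactly the starts of
--     # occurrences of tokens_c, so a token gets a 1 exactly when it is '[CLS]'
--     # and a surviving start follows it.
--     occ = {i + 1 for i, tok in enumerate(tokens_a) if tok == '[CLS]'}
--     for j, t in enumerate(tokens_c):
--         occ = {p for p in occ if p + j < n and tokens_a[p + j] == t}
--     return [1 if tok == '[CLS]' and (i + 1) in occ else 0 for i, tok in enumerate(tokens_a)]
-- ===== Notes on version B (the rewrite author's own statement) =====
-- stated objective: alternative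
-- what changed: A compares the slice after each '[CLS]' against tokens_c, candidate-major; B inverts the verification to offset-major set refinement: it seeds a set with the positions right after a '[CLS]' and applies one global filter per pattern offset j (keep p iff tokens_a[p+j] == tokens_c[j]), so the survivors are exactly the occurrence starts and no slice is ever built or compared.
import Mathlib
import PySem

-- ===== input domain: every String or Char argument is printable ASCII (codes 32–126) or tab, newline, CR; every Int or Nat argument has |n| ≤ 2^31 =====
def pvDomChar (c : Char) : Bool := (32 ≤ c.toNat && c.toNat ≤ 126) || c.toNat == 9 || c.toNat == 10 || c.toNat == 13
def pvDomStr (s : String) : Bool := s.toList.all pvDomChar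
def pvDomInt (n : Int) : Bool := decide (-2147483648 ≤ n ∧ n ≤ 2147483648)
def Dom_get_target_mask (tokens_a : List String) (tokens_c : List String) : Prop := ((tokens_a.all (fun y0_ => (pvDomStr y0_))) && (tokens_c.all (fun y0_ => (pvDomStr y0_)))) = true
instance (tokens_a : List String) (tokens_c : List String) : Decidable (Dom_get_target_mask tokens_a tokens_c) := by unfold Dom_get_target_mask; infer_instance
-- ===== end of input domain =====

-- B inverts the verification: instead of comparing a slice per '[CLS]', it refines the set of
-- candidate starts (positions right after a '[CLS]') with one global filter per pattern offset,
-- then marks the '[CLS]' tokens followed by a surviving start (objective: alternative algorithm).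

-- ===== PORT A =====
def get_target_mask (tokens_a : List String) (tokens_c : List String) : List Int :=
  (PySem.List.enumerate tokens_a).foldl
    (fun target_mask p =>
      if p.2 == "[CLS]" then
        if PySem.List.slice tokens_a (some (p.1 + 1)) (some (p.1 + 1 + (tokens_c.length : Int))) == tokens_c then
          target_mask ++ [1]
        else
          target_mask ++ [0]
      else
        target_mask ++ [0]) []

-- ===== PORT B =====
def get_target_mask_alt (tokens_a : List String) (tokens_c : List String) : List Int :=
  let n : Int := tokens_a.length
  -- occ = {i+1 : tokens_a[i] == '[CLS]'}; for j, t in enumerate(tokens_c): occ = {p for p in occ if p + j < n and tokens_a[p + j] == t}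
  let occ : PySem.Set Int :=
    (PySem.List.enumerate tokens_c).foldl
      (fun occ jt =>
        occ.filter (fun p => decide (p + jt.1 < n) && (PySem.List.pyGetD tokens_a (p + jt.1) "" == jt.2)))
      (PySem.Set.ofList
        (((PySem.List.enumerate tokens_a).filter (fun it => it.2 == "[CLS]")).map
          (fun it => it.1 + 1)))
  (PySem.List.enumerate tokens_a).map
    (fun it => if it.2 == "[CLS]" && PySem.Set.contains occ (it.1 + 1) then (1 : Int) else 0)

-- ===== PRECONDITION & SPEC =====
def Spec_get_target_mask (tokens_a : List String) (tokens_c : List String) (out : List Int) : Prop := out = get_target_mask_alt tokens_a tokens_c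
instance (tokens_a : List String) (tokens_c : List String) (out : List Int) : Decidable (Spec_get_target_mask tokens_a tokens_c out) := by unfold Spec_get_target_mask; infer_instance

-- ===== CLAIM (what is proved, stated in full; the proofs are below) =====
def Claim_equal_get_target_mask : Prop := ∀ (tokens_a : List String) (tokens_c : List String), Dom_get_target_mask tokens_a tokens_c → Spec_get_target_mask tokens_a tokens_c (get_target_mask tokens_a tokens_c)

-- ===== LEMMAS AND PROOFS =====

-- Membership in a fold of set filters: in the seed and passing every filter.
lemma mem_foldl_filter {α β : Type} (l : List α) (g : α → β → Bool)
    (s : List β) (x : β) :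
    x ∈ l.foldl (fun s a => s.filter (g a)) s ↔ x ∈ s ∧ ∀ a ∈ l, g a x = true := by
  induction l generalizing s with
  | nil => simp
  | cons a t ih =>
    simp only [List.foldl_cons, ih, List.mem_filter, List.mem_cons]
    constructor
    · rintro ⟨⟨hs, hf⟩, ht⟩
      exact ⟨hs, fun b hb => hb.elim (fun h => h ▸ hf) (ht b)⟩
    · rintro ⟨hs, h⟩
      exact ⟨⟨hs, h a (Or.inl rfl)⟩, fun b hb => h b (Or.inr hb)⟩

-- take of a prefix-length equals the list iff the optional indexing agrees below that length.
lemma take_length_eq_iff {α : Type} (d c : List α) :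
    d.take c.length = c ↔ ∀ j < c.length, getElem? d j = getElem? c j := by
  constructor
  · intro h j hj
    have hh : getElem? (d.take c.length) j = getElem? c j := by rw [h]
    rwa [List.getElem?_take_of_lt hj] at hh
  · intro h
    have hlen : c.length ≤ d.length := by
      by_contra hlt
      rw [Nat.not_le] at hlt
      have hx := h d.length hlt
      rw [List.getElem?_eq_none_iff.mpr (le_refl _)] at hx
      rw [eq_comm, List.getElem?_eq_none_iff] at hx
      omega
    apply List.ext_getElem?
    intro j
    by_cases hj : j < c.length
    · rw [List.getElem?_take_of_lt hj]; exact h j hj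
    · rw [List.getElem?_eq_none_iff.mpr (by simp; omega),
          List.getElem?_eq_none_iff.mpr (by omega)]

-- For 0 ≤ k < n, membership of k+1 in B's occurrence set coincides with A's slice test.
lemma occ_mem_iff_slice (tokens_a tokens_c : List String) (k : Nat) (hk : k < tokens_a.length)
    (hcls : tokens_a[k] = "[CLS]") :
    ((k : Int) + 1) ∈
      (PySem.List.enumerate tokens_c).foldl
        (fun occ jt =>
          occ.filter (fun p => decide (p + jt.1 < (tokens_a.length : Int)) &&
            (PySem.List.pyGetD tokens_a (p + jt.1) "" == jt.2)))
        (PySem.Set.ofList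
          (((PySem.List.enumerate tokens_a).filter (fun it => it.2 == "[CLS]")).map
            (fun it => it.1 + 1)))
    ↔ PySem.List.slice tokens_a (some ((k : Int) + 1))
        (some ((k : Int) + 1 + (tokens_c.length : Int))) = tokens_c := by
  rw [mem_foldl_filter]
  -- the slice is a drop/take
  have hcast : ((k : Int) + 1) = ((k + 1 : Nat) : Int) := by push_cast; ring
  have hslice : PySem.List.slice tokens_a (some ((k : Int) + 1))
      (some ((k : Int) + 1 + (tokens_c.length : Int)))
      = (tokens_a.drop (k + 1)).take tokens_c.length := by
    rw [hcast, PySem.List.slice_natCast_add]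
  rw [hslice, take_length_eq_iff]
  have hseed : ((k : Int) + 1) ∈
      PySem.Set.ofList
        (((PySem.List.enumerate tokens_a).filter (fun it => it.2 == "[CLS]")).map
          (fun it => it.1 + 1)) := by
    rw [PySem.Set.mem_ofList, List.mem_map]
    refine ⟨((k : Int), tokens_a[k]), List.mem_filter.mpr ⟨?_, by simp [hcls]⟩, rfl⟩
    rw [PySem.List.mem_enumerate_iff]
    exact ⟨k, hk, by simp⟩
  constructor
  · rintro ⟨-, h⟩ j hj
    have hmem : ((j : Int), tokens_c[j]) ∈ PySem.List.enumerate tokens_c := by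
      rw [PySem.List.mem_enumerate_iff]
      exact ⟨j, hj, by simp⟩
    have hx := h _ hmem
    rw [Bool.and_eq_true, decide_eq_true_iff] at hx
    obtain ⟨hlt, hval⟩ := hx
    have hlt' : k + 1 + j < tokens_a.length := by simp at hlt; omega
    rw [PySem.List.pyGetD_eq_getElem tokens_a "" (by omega) (by simpa using hlt)] at hval
    have hidx : ((k : Int) + 1 + (j : Int)).toNat = k + 1 + j := by omega
    simp only [hidx] at hval
    rw [List.getElem?_drop, List.getElem?_eq_getElem hj,
        List.getElem?_eq_getElem hlt']
    simpa using hval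
  · intro h
    refine ⟨hseed, ?_⟩
    intro jt hjt
    rw [PySem.List.mem_enumerate_iff] at hjt
    obtain ⟨j, hj, rfl⟩ := hjt
    simp only [zero_add]
    have hx := h j hj
    rw [List.getElem?_drop, List.getElem?_eq_getElem hj] at hx
    rw [List.getElem?_eq_some_iff] at hx
    obtain ⟨hlt, hval⟩ := hx
    rw [Bool.and_eq_true, decide_eq_true_iff]
    refine ⟨by omega, ?_⟩
    rw [PySem.List.pyGetD_eq_getElem tokens_a "" (by omega) (by omega)]
    have hidx : ((k : Int) + 1 + (j : Int)).toNat = k + 1 + j := by omega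
    simp only [hidx]
    simpa using hval

-- ===== VERDICT (by name: the statement is the Claim_ definition above) =====
theorem get_target_mask_spec : Claim_equal_get_target_mask := by
  intro tokens_a tokens_c _
  unfold Spec_get_target_mask get_target_mask get_target_mask_alt
  simp only []
  -- A's append loop is a map over the enumeration
  have hA :
      (PySem.List.enumerate tokens_a).foldl
        (fun target_mask p =>
          if p.2 == "[CLS]" then
            if PySem.List.slice tokens_a (some (p.1 + 1))
                (some (p.1 + 1 + (tokens_c.length : Int))) == tokens_c then
              target_mask ++ [1]
            else target_mask ++ [0]
          else target_mask ++ [0]) ([] : List Int)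
      = (PySem.List.enumerate tokens_a).map
          (fun p => if p.2 == "[CLS]" then
              (if PySem.List.slice tokens_a (some (p.1 + 1))
                  (some (p.1 + 1 + (tokens_c.length : Int))) == tokens_c then (1 : Int) else 0)
            else 0) := by
    have hm := PySem.List.foldl_append_singleton_eq_map
      (f := fun (p : Int × String) => if p.2 == "[CLS]" then
          (if PySem.List.slice tokens_a (some (p.1 + 1))
              (some (p.1 + 1 + (tokens_c.length : Int))) == tokens_c then (1 : Int) else 0)
        else 0)
      (l := PySem.List.enumerate tokens_a) (acc := [])
    simp only [List.nil_append] at hm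
    rw [← hm]
    apply PySem.List.foldl_congr_mem
    intro acc p _
    by_cases h1 : p.2 == "[CLS]" <;>
      by_cases h2 : PySem.List.slice tokens_a (some (p.1 + 1))
          (some (p.1 + 1 + (tokens_c.length : Int))) == tokens_c <;>
        simp [h1, h2]
  rw [hA]
  apply List.map_congr_left
  intro p hp
  rw [PySem.List.mem_enumerate_iff] at hp
  obtain ⟨k, hk, rfl⟩ := hp
  simp only [zero_add]
  by_cases h1 : tokens_a[k] == "[CLS]"
  case neg => simp [h1]
  have hocc := occ_mem_iff_slice tokens_a tokens_c k hk (by simpa using h1)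
  by_cases h2 : PySem.List.slice tokens_a (some ((k : Int) + 1))
        (some ((k : Int) + 1 + (tokens_c.length : Int))) = tokens_c
  · have hmem := hocc.mpr h2
    simp [h1, h2, hmem]
  · have hmem := (not_iff_not.mpr hocc).mpr h2
    simp [h1, h2, hmem]
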